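-- pv_equiv track=rewrite | github.com/RDNordic/ai-championship-warroom | submissions/grocerybot-ko-version/src/grocerybot/strategies/memory_solo.py | _generate_trip_candidates
-- ===== SOURCE A (Python) =====
-- from itertools import combinations
--
-- def _pick_multiset_combinations(
--     items: list[str],
--     k: int,
-- ) -> set[tuple[str, ...]]:
--     """Unique k-sized multiset combinations from a list with duplicates."""
--     if k <= 0:
--         return {()}
--     if k > len(items):
--         return set()
--     result: set[tuple[str, ...]] = set()
--     for idxs in combinations(range(len(items)), k):
--         combo = tuple(sorted(items[i] for i in idxs))
--         result.add(combo)
--     return result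
--
-- def _generate_trip_candidates(
--
--     space: int,
--     needed_active: list[str],
--     needed_preview: list[str],
-- ) -> set[tuple[str, ...]]:
--     """Generate feasible pickup multisets for this trip."""
--     if space <= 0:
--         return set()
--
--     candidates: set[tuple[str, ...]] = set()
--
--     if needed_active:
--         # Active doesn't fit in this trip: choose best subset of size=space.
--         if len(needed_active) >= space:
--             return _pick_multiset_combinations(needed_active, space)
--
--         # Active fits: include all active, optionally fill with preview.
--         base = tuple(sorted(needed_active))
--         candidates.add(base)
--         remaining_space = space - len(needed_active)
--         for k in range(1, remaining_space + 1):
--             for preview_combo in _pick_multiset_combinations(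
--                 needed_preview, k,
--             ):
--                 candidates.add(tuple(sorted(base + preview_combo)))
--         return candidates
--
--     # Active already satisfied by inventory: optional preview detour.
--     candidates.add(())
--     for k in range(1, space + 1):
--         candidates.update(
--             _pick_multiset_combinations(needed_preview, k),
--         )
--     return candidates
-- ===== SOURCE B (Python) =====
-- def _unique_multiset_combos(items, k, skipped=frozenset()):
--     """Every distinct k-sized multiset of items exactly once: take items[0]
--     (unless an equal value was skipped earlier on this branch) or skip it."""
--     if k <= 0:
--         return [()]
--     if not items:
--         return []
--     x, rest = items[0], items[1:]
--     out = []
--     if x not in skipped: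
--         out += [(x,) + c for c in _unique_multiset_combos(rest, k - 1, skipped)]
--     out += _unique_multiset_combos(rest, k, skipped | {x})
--     return out
--
--
-- def _generate_trip_candidates(space, needed_active, needed_preview):
--     if space <= 0:
--         return set()
--     if needed_active and len(needed_active) >= space:
--         return {tuple(sorted(c)) for c in _unique_multiset_combos(needed_active, space)}
--     # Active fits (or is empty): base plus a preview fill of every feasible size,
--     # size 0 giving the bare base; one comprehension covers both remaining cases.
--     base = sorted(needed_active)
--     return {
--         tuple(sorted(base + list(c)))
--         for k in range(min(space - len(needed_active), len(needed_preview)) + 1)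
--         for c in _unique_multiset_combos(needed_preview, k)
--     }
-- ===== Notes on version B (the rewrite author's own statement) =====
-- stated objective: alternative
-- what changed: A enumerates all C(n,k) index combinations, sorts each and dedupes through a set, in three separate branches; B generates each distinct multiset exactly once by a take-or-skip DFS that never takes a value it has already skipped, and collapses A's two fill branches into one comprehension over fill sizes 0..space-len(active), so no dedup pass over duplicate combinations is needed.
import Mathlib
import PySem

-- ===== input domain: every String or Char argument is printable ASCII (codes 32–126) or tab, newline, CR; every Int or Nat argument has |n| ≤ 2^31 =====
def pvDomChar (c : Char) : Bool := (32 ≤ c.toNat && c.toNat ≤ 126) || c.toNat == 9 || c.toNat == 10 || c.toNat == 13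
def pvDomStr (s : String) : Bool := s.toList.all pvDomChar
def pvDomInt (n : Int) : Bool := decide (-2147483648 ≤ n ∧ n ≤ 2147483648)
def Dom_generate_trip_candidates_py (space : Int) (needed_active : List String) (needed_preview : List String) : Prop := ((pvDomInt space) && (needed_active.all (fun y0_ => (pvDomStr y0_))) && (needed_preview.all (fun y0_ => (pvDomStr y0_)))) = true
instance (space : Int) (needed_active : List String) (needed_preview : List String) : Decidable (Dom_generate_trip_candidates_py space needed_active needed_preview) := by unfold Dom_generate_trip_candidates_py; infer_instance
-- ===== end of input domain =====

-- B replaces A's exhaustive C(n,k) index-combination enumeration + set dedup (in three branches) by a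
-- take-or-skip DFS that generates each distinct multiset exactly once, with A's two fill branches
-- collapsed into one comprehension over fill sizes 0..space-len(active) (objective: alternative).
-- The Python return type is a set; both ports return its elements in A's insertion order
-- (Python's hash iteration order over a set is not modelled; the set VALUE is what matches).

-- ===== PORT A =====
-- sorted(l) (key = identity)
def pvSortS (l : List String) : List String := PySem.List.sorted l (fun s => s) false

-- itertools.combinations(range(len(items)), k) followed by items[i]: the tuples of
-- combinations(items, k) in the same (index-lexicographic) order — exact.
def pvCombA : Nat → List String → List (List String)
  | 0, _ => [[]]
  | _ + 1, [] => []
  | k + 1, x :: xs => ((pvCombA k xs).map (fun c => x :: c)) ++ pvCombA (k + 1) xs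

-- _pick_multiset_combinations
def pvPickA (items : List String) (k : Int) : List (List String) :=
  if k ≤ 0 then [[]]
  else if k > (items.length : Int) then []
  else PySem.Set.ofList ((pvCombA k.toNat items).map (fun c => pvSortS c))

def generate_trip_candidates_py (space : Int) (needed_active : List String) (needed_preview : List String) : List (List String) :=
  if space ≤ 0 then []
  else if needed_active ≠ [] then
    if (needed_active.length : Int) ≥ space then pvPickA needed_active space
    else
      -- base = tuple(sorted(needed_active)); candidates = {base}; then
      -- for k in range(1, remaining_space + 1): for combo in pick(preview, k): candidates.add(sorted(base + combo))
      -- (the inner loop iterates a Python set; the resulting SET does not depend on that order)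
      (PySem.List.pyRange 1 (space - needed_active.length + 1) 1).foldl
        (fun s k => (pvPickA needed_preview k).foldl
          (fun s c => PySem.Set.add s (pvSortS (pvSortS needed_active ++ c))) s)
        (PySem.Set.add PySem.Set.empty (pvSortS needed_active))
  else
    (PySem.List.pyRange 1 (space + 1) 1).foldl
      (fun s k => PySem.Set.update s (pvPickA needed_preview k))
      (PySem.Set.add PySem.Set.empty [])

-- ===== PORT B =====
-- _unique_multiset_combos of Source B: take items[0] (unless its value was skipped earlier), or skip it
def pvDfsB (items : List String) (skipped : List String) (k : Int) : List (List String) :=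
  if k ≤ 0 then [[]]
  else
    match items with
    | [] => []
    | x :: rest =>
        (if PySem.Set.contains skipped x then []
         else (pvDfsB rest skipped (k - 1)).map (fun c => x :: c))
        ++ pvDfsB rest (PySem.Set.add skipped x) k
termination_by items.length
decreasing_by all_goals simp

def generate_trip_candidates_py_alt (space : Int) (needed_active : List String) (needed_preview : List String) : List (List String) :=
  if space ≤ 0 then []
  else if needed_active ≠ [] ∧ (needed_active.length : Int) ≥ space then
    PySem.Set.ofList ((pvDfsB needed_active PySem.Set.empty space).map (fun c => pvSortS c))
  else
    -- base = sorted(needed_active); one set comprehension over the feasible fill sizes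
    PySem.Set.ofList
      ((PySem.List.pyRange 0 (min (space - needed_active.length) needed_preview.length + 1) 1).flatMap
        (fun k => (pvDfsB needed_preview PySem.Set.empty k).map
          (fun c => pvSortS (pvSortS needed_active ++ c))))

-- ===== PRECONDITION & SPEC =====
def Spec_generate_trip_candidates_py (space : Int) (needed_active : List String) (needed_preview : List String) (out : List (List String)) : Prop := out = generate_trip_candidates_py_alt space needed_active needed_preview
instance (space : Int) (needed_active : List String) (needed_preview : List String) (out : List (List String)) : Decidable (Spec_generate_trip_candidates_py space needed_active needed_preview out) := by unfold Spec_generate_trip_candidates_py; infer_instance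

-- ===== CLAIM (what is proved, stated in full; the proofs are below) =====
def Claim_equal_generate_trip_candidates_py : Prop := ∀ (space : Int) (needed_active : List String) (needed_preview : List String), Dom_generate_trip_candidates_py space needed_active needed_preview → Spec_generate_trip_candidates_py space needed_active needed_preview (generate_trip_candidates_py space needed_active needed_preview)

-- ===== LEMMAS AND PROOFS =====

theorem pvSortS_perm (l : List String) : (pvSortS l).Perm l :=
  PySem.List.sorted_perm l (fun s => s) false

theorem pvSortS_congr {l₁ l₂ : List String} (h : l₁.Perm l₂) : pvSortS l₁ = pvSortS l₂ :=
  PySem.List.sorted_eq_sorted_of_perm l₁ l₂ (fun s => s) (fun _ _ h => h) h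

theorem perm_of_pvSortS_eq {l₁ l₂ : List String} (h : pvSortS l₁ = pvSortS l₂) : l₁.Perm l₂ :=
  ((pvSortS_perm l₁).symm.trans (h ▸ pvSortS_perm l₂))

theorem length_pvSortS (l : List String) : (pvSortS l).length = l.length :=
  PySem.List.length_sorted l (fun s => s) false

-- proof-layer Nat recursion equal to pvDfsB (structural induction is easier on it)
def pvDfsN : List String → List String → Nat → List (List String)
  | _, _, 0 => [[]]
  | [], _, _ + 1 => []
  | x :: xs, skipped, k + 1 =>
      (if PySem.Set.contains skipped x then [] else (pvDfsN xs skipped k).map (fun c => x :: c))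
      ++ pvDfsN xs (PySem.Set.add skipped x) (k + 1)

theorem pvDfsB_eq_N (items : List String) (S : List String) (k : Int) :
    pvDfsB items S k = pvDfsN items S k.toNat := by
  induction items generalizing S k with
  | nil =>
    by_cases hk : k ≤ 0
    · rw [pvDfsB, if_pos hk]
      have : k.toNat = 0 := by omega
      rw [this, pvDfsN]
    · rw [pvDfsB, if_neg hk]
      obtain ⟨m, hm⟩ : ∃ m, k.toNat = m + 1 := ⟨k.toNat - 1, by omega⟩
      rw [hm, pvDfsN]
  | cons x xs ih =>
    by_cases hk : k ≤ 0
    · rw [pvDfsB, if_pos hk]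
      have : k.toNat = 0 := by omega
      rw [this, pvDfsN]
    · rw [pvDfsB, if_neg hk]
      obtain ⟨m, hm⟩ : ∃ m, k.toNat = m + 1 := ⟨k.toNat - 1, by omega⟩
      rw [hm, pvDfsN]
      have h1 : (k - 1).toNat = m := by omega
      have h2 : k.toNat = m + 1 := hm
      rw [ih S (k - 1), h1, ih (PySem.Set.add S x) k, hm]

-- proof-layer characterisation of A's _pick_multiset_combinations as the sorted DFS tuples
def pvUniqB (items : List String) (k : Int) : List (List String) :=
  if k ≤ 0 then [[]]
  else if k > (items.length : Int) then []
  else (pvDfsN items PySem.Set.empty k.toNat).map (fun c => pvSortS c)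

theorem pvCombA_sound {k : Nat} {xs c : List String} (h : c ∈ pvCombA k xs) :
    c.length = k ∧ (↑c : Multiset String) ≤ ↑xs := by
  induction xs generalizing k c with
  | nil =>
    cases k with
    | zero => simp only [pvCombA, List.mem_singleton] at h; subst h; simp
    | succ k => simp [pvCombA] at h
  | cons x xs ih =>
    cases k with
    | zero => simp only [pvCombA, List.mem_singleton] at h; subst h; simp
    | succ k =>
      simp only [pvCombA, List.mem_append, List.mem_map] at h
      rcases h with ⟨c', hc', rfl⟩ | h
      · obtain ⟨h1, h2⟩ := ih hc'
        refine ⟨by simp [h1], ?_⟩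
        simpa using Multiset.cons_le_cons x h2
      · obtain ⟨h1, h2⟩ := ih h
        exact ⟨h1, h2.trans (by simpa using Multiset.le_cons_self (↑xs) x)⟩

theorem pvDfsN_sound {xs S : List String} {k : Nat} {c : List String} (h : c ∈ pvDfsN xs S k) :
    c.length = k ∧ (↑c : Multiset String) ≤ ↑xs ∧ ∀ v ∈ c, v ∉ S := by
  induction xs generalizing S k c with
  | nil =>
    cases k with
    | zero => simp only [pvDfsN, List.mem_singleton] at h; subst h; simp
    | succ k => simp [pvDfsN] at h
  | cons x xs ih =>
    cases k with
    | zero => simp only [pvDfsN, List.mem_singleton] at h; subst h; simp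
    | succ k =>
      have hskip : c ∈ pvDfsN xs (PySem.Set.add S x) (k + 1) →
          c.length = k + 1 ∧ (↑c : Multiset String) ≤ ↑(x :: xs) ∧ ∀ v ∈ c, v ∉ S := by
        intro h
        obtain ⟨h1, h2, h3⟩ := ih h
        refine ⟨h1, h2.trans (by simpa using Multiset.le_cons_self (↑xs) x), ?_⟩
        intro v hv hvS
        exact h3 v hv ((PySem.Set.mem_add S x v).mpr (Or.inl hvS))
      simp only [pvDfsN, List.mem_append] at h
      by_cases hcc : PySem.Set.contains S x = true
      · rw [if_pos hcc] at h
        rcases h with h | h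
        · simp at h
        · exact hskip h
      · rw [if_neg hcc] at h
        rcases h with h | h
        · obtain ⟨c', hc', rfl⟩ := List.mem_map.mp h
          obtain ⟨h1, h2, h3⟩ := ih hc'
          refine ⟨by simp [h1], by simpa using Multiset.cons_le_cons x h2, ?_⟩
          intro v hv
          rcases List.mem_cons.mp hv with rfl | hv
          · intro hvS
            exact hcc ((PySem.Set.contains_iff S v).mpr hvS)
          · exact h3 v hv
        · exact hskip h

theorem pvDfsN_complete {xs S : List String} {k : Nat} {m : List String}
    (hle : (↑m : Multiset String) ≤ ↑xs) (hlen : m.length = k) (hS : ∀ v ∈ m, v ∉ S) :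
    ∃ c ∈ pvDfsN xs S k, (↑c : Multiset String) = ↑m := by
  induction xs generalizing S k m with
  | nil =>
    cases k with
    | zero =>
      have : m = [] := List.length_eq_zero_iff.mp hlen
      subst this; exact ⟨[], by simp [pvDfsN]⟩
    | succ k =>
      exfalso
      have := Multiset.card_le_card hle
      simp [hlen] at this
  | cons x xs ih =>
    cases k with
    | zero =>
      have : m = [] := List.length_eq_zero_iff.mp hlen
      subst this; exact ⟨[], by simp [pvDfsN]⟩
    | succ k =>
      by_cases hx : x ∈ m
      · have hxS : x ∉ S := hS x hx
        have hcS : ¬ PySem.Set.contains S x = true := by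
          intro hcc
          exact hxS ((PySem.Set.contains_iff S x).mp hcc)
        have herase : (↑(m.erase x) : Multiset String) ≤ ↑xs := by
          have h1 : (↑m : Multiset String).erase x ≤ (x ::ₘ (↑xs : Multiset String)).erase x :=
            Multiset.erase_le_erase x (by simpa using hle)
          simpa using h1
        have hlen' : (m.erase x).length = k := by
          rw [List.length_erase_of_mem hx, hlen]
          omega
        have hS' : ∀ v ∈ m.erase x, v ∉ S := fun v hv => hS v (List.mem_of_mem_erase hv)
        obtain ⟨c, hc, hcm⟩ := ih herase hlen' hS'
        refine ⟨x :: c, ?_, ?_⟩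
        · simp only [pvDfsN, List.mem_append]
          rw [if_neg hcS]
          exact Or.inl (List.mem_map.mpr ⟨c, hc, rfl⟩)
        · have hpc : (↑(x :: c) : Multiset String) = x ::ₘ (↑c : Multiset String) := rfl
          rw [hpc, hcm]
          have : (↑(m.erase x) : Multiset String) = (↑m : Multiset String).erase x := by
            simp
          rw [this]
          exact Multiset.cons_erase (by simpa using hx)
      · have hle' : (↑m : Multiset String) ≤ ↑xs :=
          (Multiset.le_cons_of_notMem (by simpa using hx)).mp (by simpa using hle)
        have hS' : ∀ v ∈ m, v ∉ PySem.Set.add S x := by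
          intro v hv hvadd
          rcases (PySem.Set.mem_add S x v).mp hvadd with h | rfl
          · exact hS v hv h
          · exact hx hv
        obtain ⟨c, hc, hcm⟩ := ih hle' hlen hS'
        exact ⟨c, by simp only [pvDfsN, List.mem_append]; exact Or.inr hc, hcm⟩

theorem pvDfsN_pairwise (xs S : List String) (k : Nat) :
    (pvDfsN xs S k).Pairwise (fun a b => ¬ a.Perm b) := by
  induction xs generalizing S k with
  | nil => cases k <;> simp [pvDfsN]
  | cons x xs ih =>
    cases k with
    | zero => simp [pvDfsN]
    | succ k =>
      simp only [pvDfsN]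
      rw [List.pairwise_append]
      refine ⟨?_, ih _ _, ?_⟩
      · by_cases hcc : PySem.Set.contains S x = true
        · rw [if_pos hcc]; simp
        · rw [if_neg hcc]
          rw [List.pairwise_map]
          exact (ih S k).imp (fun {a b} hab h => hab ((List.perm_cons x).mp h))
      · intro a ha b hb hab
        have hxb : x ∉ b := by
          intro hxc
          exact (pvDfsN_sound hb).2.2 x hxc ((PySem.Set.mem_add S x x).mpr (Or.inr rfl))
        by_cases hcc : PySem.Set.contains S x = true
        · rw [if_pos hcc] at ha; simp at ha
        · rw [if_neg hcc] at ha
          obtain ⟨a', _, rfl⟩ := List.mem_map.mp ha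
          exact hxb (hab.mem_iff.mp (by simp))

theorem pvDfsN_nil_of_big {xs S : List String} {k : Nat} (h : xs.length < k) :
    pvDfsN xs S k = [] := by
  rw [List.eq_nil_iff_forall_not_mem]
  intro c hc
  obtain ⟨h1, h2, _⟩ := pvDfsN_sound hc
  have := Multiset.card_le_card h2
  simp only [Multiset.coe_card] at this
  omega

theorem pvUpdate_of_subset {s l : List (List String)} (h : ∀ a ∈ l, a ∈ s) :
    PySem.Set.update s l = s := by
  induction l generalizing s with
  | nil => rfl
  | cons a l ih =>
    rw [PySem.Set.update_cons]
    have ha : PySem.Set.add s a = s := by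
      simp [PySem.Set.add, h a (by simp)]
    rw [ha]
    exact ih (fun b hb => h b (by simp [hb]))

theorem pvMain : ∀ (xs : List String) (k : Nat) (S pre : List String) (s : List (List String)),
    (∀ c : List String, (↑c : Multiset String) ≤ ↑xs → c.length = k →
      ((pvSortS (pre ++ c)) ∈ s ↔ ∃ v ∈ c, v ∈ S)) →
    PySem.Set.update s ((pvCombA k xs).map (fun c => pvSortS (pre ++ c)))
      = s ++ (pvDfsN xs S k).map (fun c => pvSortS (pre ++ c)) := by
  intro xs
  induction xs with
  | nil =>
    intro k S pre s H
    cases k with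
    | zero =>
      have hnot : pvSortS (pre ++ ([] : List String)) ∉ s := by
        intro hmem
        rcases (H [] (by simp) rfl).mp hmem with ⟨v, hv, _⟩
        simp at hv
      show PySem.Set.update s [pvSortS (pre ++ ([] : List String))] = _
      rw [PySem.Set.update_eq_append_of_disjoint s _ (by simp) (by simpa using hnot)]
      simp [pvDfsN]
    | succ k => simp [pvCombA, pvDfsN, PySem.Set.update]
  | cons x xs ih =>
    intro k S pre s H
    cases k with
    | zero =>
      have hnot : pvSortS (pre ++ ([] : List String)) ∉ s := by
        intro hmem
        rcases (H [] (by simp) rfl).mp hmem with ⟨v, hv, _⟩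
        simp at hv
      show PySem.Set.update s [pvSortS (pre ++ ([] : List String))] = _
      rw [PySem.Set.update_eq_append_of_disjoint s _ (by simp) (by simpa using hnot)]
      simp [pvDfsN]
    | succ k =>
      simp only [pvCombA, pvDfsN, List.map_append, List.map_map]
      rw [PySem.Set.update_append]
      have hcomp : ((fun c => pvSortS (pre ++ c)) ∘ (fun c => x :: c))
          = (fun c => pvSortS ((pre ++ [x]) ++ c)) := by
        funext c
        simp only [Function.comp]
        rw [List.append_assoc]
        rfl
      rw [hcomp]
      by_cases hxS : x ∈ S
      · -- x already skipped-or-present: every tuple through x is already in s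
        have hcc : PySem.Set.contains S x = true := (PySem.Set.contains_iff S x).mpr hxS
        have h1 : PySem.Set.update s ((pvCombA k xs).map (fun c => pvSortS ((pre ++ [x]) ++ c))) = s := by
          apply pvUpdate_of_subset
          intro a ha
          obtain ⟨c, hc, rfl⟩ := List.mem_map.mp ha
          obtain ⟨hlen, hle⟩ := pvCombA_sound hc
          rw [List.append_assoc]
          exact (H (x :: c) (by simpa using Multiset.cons_le_cons x hle) (by simp [hlen])).mpr
            ⟨x, by simp, hxS⟩
        rw [h1]
        have H' : ∀ c : List String, (↑c : Multiset String) ≤ ↑xs → c.length = k + 1 →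
            ((pvSortS (pre ++ c)) ∈ s ↔ ∃ v ∈ c, v ∈ PySem.Set.add S x) := by
          intro c hle hlen
          rw [H c (hle.trans (by simpa using Multiset.le_cons_self (↑xs) x)) hlen]
          constructor
          · rintro ⟨v, hv, hvS⟩
            exact ⟨v, hv, (PySem.Set.mem_add S x v).mpr (Or.inl hvS)⟩
          · rintro ⟨v, hv, hvadd⟩
            rcases (PySem.Set.mem_add S x v).mp hvadd with h | rfl
            · exact ⟨v, hv, h⟩
            · exact ⟨v, hv, hxS⟩
        rw [ih (k + 1) (PySem.Set.add S x) pre s H']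
        rw [if_pos hcc]
        simp
      · -- x is taken first, then skipped
        have hcc : ¬ PySem.Set.contains S x = true := fun hcc => hxS ((PySem.Set.contains_iff S x).mp hcc)
        have H₁ : ∀ c : List String, (↑c : Multiset String) ≤ ↑xs → c.length = k →
            ((pvSortS ((pre ++ [x]) ++ c)) ∈ s ↔ ∃ v ∈ c, v ∈ S) := by
          intro c hle hlen
          rw [List.append_assoc]
          rw [show [x] ++ c = x :: c from rfl]
          rw [H (x :: c) (by simpa using Multiset.cons_le_cons x hle) (by simp [hlen])]
          constructor
          · rintro ⟨v, hv, hvS⟩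
            rcases List.mem_cons.mp hv with rfl | hv
            · exact absurd hvS hxS
            · exact ⟨v, hv, hvS⟩
          · rintro ⟨v, hv, hvS⟩
            exact ⟨v, by simp [hv], hvS⟩
        have IH₁ := ih k S (pre ++ [x]) s H₁
        rw [IH₁]
        have H₂ : ∀ c : List String, (↑c : Multiset String) ≤ ↑xs → c.length = k + 1 →
            ((pvSortS (pre ++ c)) ∈ s ++ (pvDfsN xs S k).map (fun c => pvSortS ((pre ++ [x]) ++ c))
              ↔ ∃ v ∈ c, v ∈ PySem.Set.add S x) := by
          intro c hle hlen
          rw [List.mem_append]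
          constructor
          · rintro (hmem | hmem)
            · obtain ⟨v, hv, hvS⟩ :=
                (H c (hle.trans (by simpa using Multiset.le_cons_self (↑xs) x)) hlen).mp hmem
              exact ⟨v, hv, (PySem.Set.mem_add S x v).mpr (Or.inl hvS)⟩
            · obtain ⟨c', hc', heq⟩ := List.mem_map.mp hmem
              have hperm : (x :: c').Perm c := by
                have := perm_of_pvSortS_eq heq
                rw [List.append_assoc] at this
                exact (List.perm_append_left_iff pre).mp this
              exact ⟨x, hperm.mem_iff.mp (by simp), (PySem.Set.mem_add S x x).mpr (Or.inr rfl)⟩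
          · rintro ⟨v, hv, hvadd⟩
            by_cases hsome : ∃ w ∈ c, w ∈ S
            · obtain ⟨w, hw, hwS⟩ := hsome
              exact Or.inl
                ((H c (hle.trans (by simpa using Multiset.le_cons_self (↑xs) x)) hlen).mpr ⟨w, hw, hwS⟩)
            · rcases (PySem.Set.mem_add S x v).mp hvadd with h | rfl
              · exact absurd ⟨v, hv, h⟩ hsome
              · -- v = x ∈ c, no value of c is in S: the canonical selection exists in the DFS
                right
                have herase : (↑(c.erase v) : Multiset String) ≤ ↑xs := by
                  have h1 : (↑(c.erase v) : Multiset String) ≤ ↑c := by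
                    have : (↑(c.erase v) : Multiset String) = (↑c : Multiset String).erase v := by
                      simp
                    rw [this]
                    exact Multiset.erase_le v _
                  exact h1.trans hle
                have hlen' : (c.erase v).length = k := by
                  rw [List.length_erase_of_mem hv, hlen]
                  omega
                have hS' : ∀ w ∈ c.erase v, w ∉ S := by
                  intro w hw hwS
                  exact hsome ⟨w, List.mem_of_mem_erase hw, hwS⟩
                obtain ⟨c', hc', hcm⟩ := pvDfsN_complete herase hlen' hS'
                refine List.mem_map.mpr ⟨c', hc', ?_⟩
                rw [List.append_assoc]
                apply pvSortS_congr
                apply List.Perm.append_left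
                have : (↑(v :: c') : Multiset String) = ↑c := by
                  have h1 : (↑(v :: c') : Multiset String) = v ::ₘ (↑(c.erase v) : Multiset String) := by
                    rw [← hcm]; rfl
                  rw [h1]
                  have h2 : (↑(c.erase v) : Multiset String) = (↑c : Multiset String).erase v := by
                    simp
                  rw [h2]
                  exact Multiset.cons_erase (by simpa using hv)
                exact Multiset.coe_eq_coe.mp this
        have IH₂ := ih (k + 1) (PySem.Set.add S x)
          pre (s ++ (pvDfsN xs S k).map (fun c => pvSortS ((pre ++ [x]) ++ c))) H₂
        rw [IH₂]
        rw [if_neg hcc]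
        simp [hcomp, List.append_assoc]

theorem pvUniqB_mem {items : List String} {k : Int} {y : List String} (h : y ∈ pvUniqB items k) :
    pvSortS y = y ∧ y.length = k.toNat := by
  unfold pvUniqB at h
  by_cases hk : k ≤ 0
  · rw [if_pos hk] at h
    simp only [List.mem_singleton] at h
    subst h
    refine ⟨rfl, ?_⟩
    simp
    omega
  · rw [if_neg hk] at h
    by_cases hbig : k > (items.length : Int)
    · rw [if_pos hbig] at h
      simp at h
    rw [if_neg hbig] at h
    obtain ⟨c, hc, rfl⟩ := List.mem_map.mp h
    refine ⟨PySem.List.sorted_sorted c (fun s => s), ?_⟩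
    rw [length_pvSortS]
    exact (pvDfsN_sound hc).1

theorem pvUniqB_nodup (items : List String) (k : Int) : (pvUniqB items k).Nodup := by
  unfold pvUniqB
  by_cases hk : k ≤ 0
  · rw [if_pos hk]; simp
  · rw [if_neg hk]
    by_cases hbig : k > (items.length : Int)
    · rw [if_pos hbig]
      simp
    rw [if_neg hbig]
    rw [List.Nodup, List.pairwise_map]
    exact (pvDfsN_pairwise items PySem.Set.empty k.toNat).imp
      (fun h heq => h (perm_of_pvSortS_eq heq))

theorem pvUniqB_nil {items : List String} {k : Int} (h1 : 1 ≤ k)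
    (h2 : (items.length : Int) < k) : pvUniqB items k = [] := by
  unfold pvUniqB
  rw [if_neg (by omega : ¬ k ≤ 0), if_pos (by omega : k > (items.length : Int))]

theorem pvPickA_eq_pvUniqB (items : List String) (k : Int) :
    pvPickA items k = pvUniqB items k := by
  unfold pvPickA pvUniqB
  by_cases hk : k ≤ 0
  · rw [if_pos hk, if_pos hk]
  · rw [if_neg hk, if_neg hk]
    have hmain := pvMain items k.toNat PySem.Set.empty [] []
      (by intro c _ _; simp)
    simp only [List.nil_append] at hmain
    by_cases hbig : k > (items.length : Int)
    · rw [if_pos hbig, if_pos hbig]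
    · rw [if_neg hbig, if_neg hbig]
      calc PySem.Set.ofList ((pvCombA k.toNat items).map (fun c => pvSortS c))
          = PySem.Set.update [] ((pvCombA k.toNat items).map (fun c => pvSortS c)) := rfl
        _ = (pvDfsN items PySem.Set.empty k.toNat).map (fun c => pvSortS c) := hmain

-- per-size block of A's loop = per-size block of B's comprehension (same list, same order)
theorem pvBlock_eq (np na : List String) (k : Int) (hk : 1 ≤ k) :
    (pvUniqB np k).map (fun c => pvSortS (pvSortS na ++ c))
      = (pvDfsB np PySem.Set.empty k).map (fun c => pvSortS (pvSortS na ++ c)) := by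
  rw [pvDfsB_eq_N]
  unfold pvUniqB
  rw [if_neg (by omega : ¬ k ≤ 0)]
  by_cases hbig : k > (np.length : Int)
  · rw [if_pos hbig]
    rw [pvDfsN_nil_of_big (by omega : np.length < k.toNat)]
  · rw [if_neg hbig]
    simp only [List.map_map]
    apply List.map_congr_left
    intro c _
    exact pvSortS_congr ((pvSortS_perm c).append_left (pvSortS na))

-- the loop over feasible sizes k: A's dedup-update appends exactly B's per-size blocks
theorem pvFold (p : List String) (f : List String → List String) (d : Nat)
    (hflen : ∀ (k : Int) (y : List String), 1 ≤ k → y ∈ (pvUniqB p k).map f → y.length = d + k.toNat)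
    (hfnd : ∀ (k : Int), 1 ≤ k → ((pvUniqB p k).map f).Nodup) :
    ∀ (L : List Int) (s : List (List String)),
    (∀ k ∈ L, 1 ≤ k) → L.Nodup →
    (∀ y ∈ s, ∀ k ∈ L, y.length ≠ d + k.toNat) →
    (L.foldl (fun s k => PySem.Set.update s ((pvUniqB p k).map f)) s
       = s ++ L.flatMap (fun k => (pvUniqB p k).map f))
    ∧ (s.Nodup → (s ++ L.flatMap (fun k => (pvUniqB p k).map f)).Nodup) := by
  intro L
  induction L with
  | nil => intro s _ _ _; simp
  | cons k L ih =>
    intro s h1 hnd hs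
    have hk1 : 1 ≤ k := h1 k (by simp)
    have hpiece_nodup : ((pvUniqB p k).map f).Nodup := hfnd k hk1
    have hdisj : ∀ y ∈ (pvUniqB p k).map f, y ∉ s := by
      intro y hy hmem
      exact hs y hmem k (by simp) (hflen k y hk1 hy)
    have hstep : PySem.Set.update s ((pvUniqB p k).map f) = s ++ (pvUniqB p k).map f :=
      PySem.Set.update_eq_append_of_disjoint s _ hpiece_nodup hdisj
    have hs' : ∀ y ∈ s ++ (pvUniqB p k).map f, ∀ k' ∈ L, y.length ≠ d + k'.toNat := by
      intro y hy k' hk' heq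
      have hk'1 : 1 ≤ k' := h1 k' (by simp [hk'])
      rcases List.mem_append.mp hy with hy | hy
      · exact hs y hy k' (by simp [hk']) heq
      · have hlk : y.length = d + k.toNat := hflen k y hk1 hy
        have : k = k' := by omega
        subst this
        exact (List.nodup_cons.mp hnd).1 hk'
    obtain ⟨ihfold, ihnodup⟩ := ih (s ++ (pvUniqB p k).map f)
      (fun k' hk' => h1 k' (by simp [hk'])) (List.nodup_cons.mp hnd).2 hs'
    constructor
    · rw [List.foldl_cons, hstep, ihfold]
      simp [List.flatMap_cons, List.append_assoc]
    · intro hsnd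
      have : (s ++ (pvUniqB p k).map f).Nodup := by
        rw [List.nodup_append]
        refine ⟨hsnd, hpiece_nodup, ?_⟩
        intro a ha b hb heq
        subst heq
        exact hdisj _ hb ha
      have := ihnodup this
      simpa [List.flatMap_cons, List.append_assoc] using this

theorem pvSortS_nil : pvSortS [] = [] := by
  have := length_pvSortS []
  simpa using List.length_eq_zero_iff.mp (by simpa using this)

set_option maxHeartbeats 1000000 in
theorem generate_trip_candidates_py_spec' : ∀ (space : Int) (needed_active : List String) (needed_preview : List String),
    generate_trip_candidates_py space needed_active needed_preview
      = generate_trip_candidates_py_alt space needed_active needed_preview := by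
  intro space na np
  unfold generate_trip_candidates_py generate_trip_candidates_py_alt
  by_cases hsp : space ≤ 0
  · rw [if_pos hsp, if_pos hsp]
  rw [if_neg hsp, if_neg hsp]
  by_cases hna : na ≠ []
  · rw [if_pos hna]
    by_cases hbig : (na.length : Int) ≥ space
    · rw [if_pos hbig, if_pos ⟨hna, hbig⟩]
      rw [pvPickA_eq_pvUniqB]
      have hB : (pvDfsB na PySem.Set.empty space).map (fun c => pvSortS c) = pvUniqB na space := by
        rw [pvDfsB_eq_N]
        unfold pvUniqB
        rw [if_neg (by omega : ¬ space ≤ 0), if_neg (by omega : ¬ space > (na.length : Int))]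
      rw [hB, PySem.Set.ofList_eq_self_of_nodup _ (pvUniqB_nodup na space)]
    · rw [if_neg hbig, if_neg (by tauto : ¬ (na ≠ [] ∧ (na.length : Int) ≥ space))]
      have hflen : ∀ (k : Int) (y : List String), 1 ≤ k →
          y ∈ (pvUniqB np k).map (fun c => pvSortS (pvSortS na ++ c)) →
          y.length = na.length + k.toNat := by
        intro k y _ hy
        obtain ⟨c, hc, rfl⟩ := List.mem_map.mp hy
        rw [length_pvSortS, List.length_append, length_pvSortS, (pvUniqB_mem hc).2]
      have hfnd : ∀ (k : Int), 1 ≤ k →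
          ((pvUniqB np k).map (fun c => pvSortS (pvSortS na ++ c))).Nodup := by
        intro k _
        refine List.Nodup.map_on ?_ (pvUniqB_nodup np k)
        intro u hu v hv huv
        have hperm : u.Perm v :=
          (List.perm_append_left_iff (pvSortS na)).mp (perm_of_pvSortS_eq huv)
        rw [← (pvUniqB_mem hu).1, ← (pvUniqB_mem hv).1]
        exact pvSortS_congr hperm
      have hLpos : ∀ k ∈ PySem.List.pyRange 1 (space - ↑na.length + 1) 1, 1 ≤ k :=
        fun k hk => (PySem.List.mem_pyRange_one.mp hk).1
      have hLnd : (PySem.List.pyRange 1 (space - ↑na.length + 1) 1).Nodup :=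
        PySem.List.nodup_pyRange_one 1 (space - ↑na.length + 1)
      have hbase_len : ∀ y ∈ [pvSortS na], ∀ k ∈ PySem.List.pyRange 1 (space - ↑na.length + 1) 1,
          y.length ≠ na.length + k.toNat := by
        intro y hy k hk
        have hk1 : 1 ≤ k := hLpos k hk
        simp only [List.mem_singleton] at hy
        subst hy
        rw [length_pvSortS]
        omega
      obtain ⟨hfold, hnodup⟩ := pvFold np (fun c => pvSortS (pvSortS na ++ c)) na.length
        hflen hfnd (PySem.List.pyRange 1 (space - ↑na.length + 1) 1) [pvSortS na]
        hLpos hLnd hbase_len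
      have hfun : (fun (s : List (List String)) (k : Int) =>
            (pvPickA np k).foldl (fun s c => PySem.Set.add s (pvSortS (pvSortS na ++ c))) s)
          = (fun s k =>
            PySem.Set.update s ((pvUniqB np k).map (fun c => pvSortS (pvSortS na ++ c)))) := by
        funext s k
        rw [← pvPickA_eq_pvUniqB, PySem.Set.update_map_eq_foldl_add]
      rw [hfun]
      have hinit : PySem.Set.add PySem.Set.empty (pvSortS na) = [pvSortS na] := rfl
      rw [hinit, hfold]
      -- B side: peel off the size-0 block (the bare base) and identify the remaining blocks
      rw [PySem.List.pyRange_one_cons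
        (by omega : (0 : Int) < min (space - ↑na.length) ↑np.length + 1)]
      rw [List.flatMap_cons]
      have h0 : (pvDfsB np PySem.Set.empty 0).map (fun c => pvSortS (pvSortS na ++ c)) = [pvSortS na] := by
        have : pvDfsB np PySem.Set.empty 0 = [[]] := by unfold pvDfsB; simp
        rw [this]
        simp only [List.map_cons, List.map_nil, List.append_nil]
        simp only [pvSortS]
        rw [PySem.List.sorted_sorted]
      rw [h0]
      have hblocks : (PySem.List.pyRange (0 + 1) (min (space - ↑na.length) ↑np.length + 1) 1).flatMap
            (fun k => (pvDfsB np PySem.Set.empty k).map (fun c => pvSortS (pvSortS na ++ c)))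
          = (PySem.List.pyRange 1 (space - ↑na.length + 1) 1).flatMap
            (fun k => (pvUniqB np k).map (fun c => pvSortS (pvSortS na ++ c))) := by
        simp only [zero_add]
        rw [PySem.List.pyRange_one_append 1 (min (space - ↑na.length) ↑np.length + 1)
          (space - ↑na.length + 1) (by omega) (by omega)]
        rw [List.flatMap_append]
        have htail : (PySem.List.pyRange (min (space - ↑na.length) ↑np.length + 1)
              (space - ↑na.length + 1) 1).flatMap
            (fun k => (pvUniqB np k).map (fun c => pvSortS (pvSortS na ++ c))) = [] := by
          rw [List.flatMap_eq_nil_iff]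
          intro k hk
          obtain ⟨hk1, hk2⟩ := PySem.List.mem_pyRange_one.mp hk
          rw [pvUniqB_nil (by omega) (by omega)]
          rfl
        rw [htail, List.append_nil]
        rw [List.flatMap, List.flatMap]
        congr 1
        apply List.map_congr_left
        intro k hk
        exact (pvBlock_eq np na k (PySem.List.mem_pyRange_one.mp hk).1).symm
      rw [hblocks]
      rw [PySem.Set.ofList_eq_self_of_nodup _ (hnodup (by simp))]
  · rw [if_neg hna, if_neg (by tauto : ¬ (na ≠ [] ∧ (na.length : Int) ≥ space))]
    have hna' : na = [] := by tauto
    subst hna'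
    have hflen : ∀ (k : Int) (y : List String), 1 ≤ k → y ∈ (pvUniqB np k).map (fun y => y) →
        y.length = 0 + k.toNat := by
      intro k y _ hy
      rw [List.map_id'] at hy
      rw [Nat.zero_add]
      exact (pvUniqB_mem hy).2
    have hfnd : ∀ (k : Int), 1 ≤ k → ((pvUniqB np k).map (fun y => y)).Nodup := by
      intro k _
      rw [List.map_id']
      exact pvUniqB_nodup np k
    have hLpos : ∀ k ∈ PySem.List.pyRange 1 (space + 1) 1, 1 ≤ k :=
      fun k hk => (PySem.List.mem_pyRange_one.mp hk).1
    have hLnd : (PySem.List.pyRange 1 (space + 1) 1).Nodup :=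
      PySem.List.nodup_pyRange_one 1 (space + 1)
    have hinit_len : ∀ y ∈ [([] : List String)], ∀ k ∈ PySem.List.pyRange 1 (space + 1) 1,
        y.length ≠ 0 + k.toNat := by
      intro y hy k hk
      have hk1 : 1 ≤ k := hLpos k hk
      simp only [List.mem_singleton] at hy
      subst hy
      simp only [List.length_nil]
      omega
    obtain ⟨hfold, hnodup⟩ := pvFold np (fun y => y) 0 hflen hfnd
      (PySem.List.pyRange 1 (space + 1) 1) [[]] hLpos hLnd hinit_len
    have hfun : (fun (s : List (List String)) (k : Int) => PySem.Set.update s (pvPickA np k))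
        = (fun s k => PySem.Set.update s ((pvUniqB np k).map (fun y => y))) := by
      funext s k
      rw [pvPickA_eq_pvUniqB, List.map_id']
    rw [hfun]
    have hinit : PySem.Set.add PySem.Set.empty ([] : List String) = [[]] := rfl
    rw [hinit, hfold]
    -- B side: the range starts at fill size 0 and the base is empty
    have hlen0 : min ((space : Int) - ↑(List.length ([] : List String))) ↑np.length
        = min space ↑np.length := by
      simp
    rw [hlen0]
    rw [PySem.List.pyRange_one_cons (by omega : (0 : Int) < min space ↑np.length + 1)]
    rw [List.flatMap_cons]
    have h0 : (pvDfsB np PySem.Set.empty 0).map (fun c => pvSortS (pvSortS [] ++ c)) = [[]] := by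
      have : pvDfsB np PySem.Set.empty 0 = [[]] := by unfold pvDfsB; simp
      rw [this]
      simp [pvSortS_nil]
    rw [h0]
    have hblocks : (PySem.List.pyRange (0 + 1) (min space ↑np.length + 1) 1).flatMap
          (fun k => (pvDfsB np PySem.Set.empty k).map (fun c => pvSortS (pvSortS [] ++ c)))
        = (PySem.List.pyRange 1 (space + 1) 1).flatMap
          (fun k => (pvUniqB np k).map (fun y => y)) := by
      simp only [zero_add]
      rw [PySem.List.pyRange_one_append 1 (min space ↑np.length + 1) (space + 1)
        (by omega) (by omega)]
      rw [List.flatMap_append]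
      have htail : (PySem.List.pyRange (min space ↑np.length + 1) (space + 1) 1).flatMap
          (fun k => (pvUniqB np k).map (fun y => y)) = [] := by
        rw [List.flatMap_eq_nil_iff]
        intro k hk
        obtain ⟨hk1, hk2⟩ := PySem.List.mem_pyRange_one.mp hk
        rw [pvUniqB_nil (by omega) (by omega)]
        rfl
      rw [htail, List.append_nil]
      rw [List.flatMap, List.flatMap]
      congr 1
      apply List.map_congr_left
      intro k hk
      have hb : (pvUniqB np k).map (fun c => pvSortS (pvSortS [] ++ c))
          = (pvDfsB np PySem.Set.empty k).map (fun c => pvSortS (pvSortS [] ++ c)) :=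
        pvBlock_eq np [] k (PySem.List.mem_pyRange_one.mp hk).1
      rw [← hb]
      have hmap : List.map (fun c => pvSortS (pvSortS [] ++ c)) (pvUniqB np k)
          = List.map (fun c => c) (pvUniqB np k) := by
        apply List.map_congr_left
        intro c hc
        rw [pvSortS_nil, List.nil_append, (pvUniqB_mem hc).1]
      rw [hmap, List.map_id']
    rw [hblocks]
    rw [PySem.Set.ofList_eq_self_of_nodup _ (hnodup (by simp))]

-- ===== VERDICT (by name: the statement is the Claim_ definition above) =====
theorem generate_trip_candidates_py_spec : Claim_equal_generate_trip_candidates_py := by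
  intro space na np _
  exact generate_trip_candidates_py_spec' space na np
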